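-- pv_equiv track=rewrite | github.com/ToniFer03/logica_lego | game.py | verifica_existencia_micro_traco
-- ===== SOURCE A (Python) =====
-- simbolos_disponiveis = ['X', 'O', '+', '-']
--
-- posicoes_traco = [
--     [(0, 0), (0, 1), (0, 2)],
--     [(0, 1), (0, 2), (0, 3)],
--     [(0, 2), (0, 3), (0, 4)],
--     [(1, 0), (1, 1), (1, 2)],
--     [(1, 1), (1, 2), (1, 3)],
--     [(1, 2), (1, 3), (1, 4)],
--     [(2, 0), (2, 1), (2, 2)],
--     [(2, 1), (2, 2), (2, 3)],
--     [(2, 2), (2, 3), (2, 4)],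
--     [(3, 0), (3, 1), (3, 2)],
--     [(3, 1), (3, 2), (3, 3)],
--     [(3, 2), (3, 3), (3, 4)],
--     [(4, 0), (4, 1), (4, 2)],
--     [(4, 1), (4, 2), (4, 3)],
--     [(4, 2), (4, 3), (4, 4)],
--     [(0, 0), (0, 1)],
--     [(0, 1), (0, 2)],
--     [(0, 2), (0, 3)],
--     [(0, 3), (0, 4)],
--     [(1, 0), (1, 1)],
--     [(1, 1), (1, 2)],
--     [(1, 2), (1, 3)],
--     [(1, 3), (1, 4)],
--     [(2, 0), (2, 1)],
--     [(2, 1), (2, 2)],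
--     [(2, 2), (2, 3)],
--     [(2, 3), (2, 4)],
--     [(3, 0), (3, 1)],
--     [(3, 1), (3, 2)],
--     [(3, 2), (3, 3)],
--     [(3, 3), (3, 4)],
--     [(4, 0), (4, 1)],
--     [(4, 1), (4, 2)],
--     [(4, 2), (4, 3)],
--     [(4, 3), (4, 4)]]
--
-- def verifica_existencia_micro_traco(tabuleiro_temp):
--     temp_posicao = posicoes_traco[15:]
--
--     for lista_posicao in temp_posicao:
--         num_correspondecias = 0
--         for posicao in lista_posicao:
--             if tabuleiro_temp[posicao[0]][posicao[1]] == simbolos_disponiveis[3]: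
--                 num_correspondecias += 1
--             else:
--                 break
--
--             if num_correspondecias == 2:
--                 return True
--
--     return False
-- ===== SOURCE B (Python) =====
-- def verifica_existencia_micro_traco(tabuleiro_temp):
--     for linha in range(5):
--         fila = tabuleiro_temp[linha]
--         anterior = fila[0] == '-'
--         for coluna in range(1, 4):
--             atual = fila[coluna] == '-'
--             if anterior and atual:
--                 return True
--             anterior = atual
--         if anterior and fila[4] == '-':
--             return True
--     return False
-- ===== Notes on version B (the rewrite author's own statement) =====
-- stated objective: simpler
-- what changed: Drops the hard-coded posicoes_traco coordinate table, its slice and the match counter entirely: B scans each row's five cells left to right exactly once, carrying a 'previous cell was -' flag, instead of re-reading cells in the table's overlapping coordinate pairs.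
import Mathlib
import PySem

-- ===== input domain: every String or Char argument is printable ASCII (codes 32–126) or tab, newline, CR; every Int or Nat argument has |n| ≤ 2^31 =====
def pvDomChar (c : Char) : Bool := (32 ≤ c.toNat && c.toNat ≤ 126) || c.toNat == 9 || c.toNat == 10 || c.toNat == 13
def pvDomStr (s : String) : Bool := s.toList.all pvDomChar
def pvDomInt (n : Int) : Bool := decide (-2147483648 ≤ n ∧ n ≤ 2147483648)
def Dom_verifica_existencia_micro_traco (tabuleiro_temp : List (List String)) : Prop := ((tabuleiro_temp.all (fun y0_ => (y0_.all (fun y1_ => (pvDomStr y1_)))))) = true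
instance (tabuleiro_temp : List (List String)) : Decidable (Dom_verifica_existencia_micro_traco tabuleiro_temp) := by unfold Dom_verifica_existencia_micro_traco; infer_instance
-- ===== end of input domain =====

-- B replaces A's hard-coded coordinate-table scan (slice of posicoes_traco, indexed lookups,
-- match counter) by a single stateful pass over the cell VALUES of the first five rows
-- (truncated to five cells), carrying a "previous cell was '-'" flag; objective: simpler.
-- Return-value equivalence only (neither mutates its argument).

-- ===== PORT A =====
-- tabuleiro_temp[r][c]; out-of-range (IndexError in Python) is excluded by Pre_, the port
-- returns "" there.
def pyCellA (tab : List (List String)) (r c : Int) : String :=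
  (PySem.List.pyGet? ((PySem.List.pyGet? tab r).getD []) c).getD ""

def posicoes_traco : List (List (Int × Int)) := [
  [(0, 0), (0, 1), (0, 2)],
  [(0, 1), (0, 2), (0, 3)],
  [(0, 2), (0, 3), (0, 4)],
  [(1, 0), (1, 1), (1, 2)],
  [(1, 1), (1, 2), (1, 3)],
  [(1, 2), (1, 3), (1, 4)],
  [(2, 0), (2, 1), (2, 2)],
  [(2, 1), (2, 2), (2, 3)],
  [(2, 2), (2, 3), (2, 4)],
  [(3, 0), (3, 1), (3, 2)],
  [(3, 1), (3, 2), (3, 3)],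
  [(3, 2), (3, 3), (3, 4)],
  [(4, 0), (4, 1), (4, 2)],
  [(4, 1), (4, 2), (4, 3)],
  [(4, 2), (4, 3), (4, 4)],
  [(0, 0), (0, 1)],
  [(0, 1), (0, 2)],
  [(0, 2), (0, 3)],
  [(0, 3), (0, 4)],
  [(1, 0), (1, 1)],
  [(1, 1), (1, 2)],
  [(1, 2), (1, 3)],
  [(1, 3), (1, 4)],
  [(2, 0), (2, 1)],
  [(2, 1), (2, 2)],
  [(2, 2), (2, 3)],
  [(2, 3), (2, 4)],
  [(3, 0), (3, 1)],
  [(3, 1), (3, 2)],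
  [(3, 2), (3, 3)],
  [(3, 3), (3, 4)],
  [(4, 0), (4, 1)],
  [(4, 1), (4, 2)],
  [(4, 2), (4, 3)],
  [(4, 3), (4, 4)]]

def simbolos_disponiveis : List String := ["X", "O", "+", "-"]

-- inner 'for posicao in lista_posicao' loop: true = 'return True' was executed
def microA_inner (tab : List (List String)) : List (Int × Int) → Int → Bool
  | [], _ => false
  | posicao :: rest, num_correspondecias =>
    if pyCellA tab posicao.1 posicao.2 == ((PySem.List.pyGet? simbolos_disponiveis 3).getD "") then
      let n' := num_correspondecias + 1
      if n' == 2 then true else microA_inner tab rest n'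
    else false  -- break: fall through to the next lista_posicao

-- outer 'for lista_posicao in temp_posicao' loop
def microA_outer (tab : List (List String)) : List (List (Int × Int)) → Bool
  | [] => false
  | lista :: rest =>
    if microA_inner tab lista 0 then true else microA_outer tab rest

def verifica_existencia_micro_traco (tabuleiro_temp : List (List String)) : Bool :=
  microA_outer tabuleiro_temp (PySem.List.slice posicoes_traco (some 15) none)

-- ===== PORT B =====
-- fila[c]; out-of-range (IndexError in Python) is excluded by Pre_, the port returns "" there
def pyCellB (fila : List String) (c : Int) : String :=
  (PySem.List.pyGet? fila c).getD ""

-- inner 'for coluna in range(1, 4)' loop; none = 'return True' was executed,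
-- some anterior = loop finished carrying the flag
def microB_cols (fila : List String) : List Int → Bool → Option Bool
  | [], anterior => some anterior
  | coluna :: rest, anterior =>
    let atual := pyCellB fila coluna == "-"
    if anterior && atual then none else microB_cols fila rest atual

-- body of one iteration of 'for linha in range(5)'
def microB_linha (tab : List (List String)) (linha : Int) : Bool :=
  let fila := (PySem.List.pyGet? tab linha).getD []
  let anterior := pyCellB fila 0 == "-"
  match microB_cols fila (PySem.List.pyRange 1 4 1) anterior with
  | none => true
  | some anterior => anterior && (pyCellB fila 4 == "-")

-- outer 'for linha in range(5)' loop
def microB_rows (tab : List (List String)) : List Int → Bool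
  | [] => false
  | linha :: rest =>
    if microB_linha tab linha then true else microB_rows tab rest

def verifica_existencia_micro_traco_alt (tabuleiro_temp : List (List String)) : Bool :=
  microB_rows tabuleiro_temp (PySem.List.pyRange 0 5 1)

-- ===== PRECONDITION & SPEC =====
-- Pre_ holds exactly when Python A returns normally: scanning the 20 adjacent horizontal
-- pairs (row k/4, column k%4) in order, no out-of-range access (IndexError) happens before
-- the first pair of adjacent '-' cells (where A returns True).
def pvRow (t : List (List String)) (r : Nat) : List String := t.getD r []

-- pair (r,c) makes A return True: both cells exist and hold '-'
def pvHit (t : List (List String)) (r c : Nat) : Bool :=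
  decide (c + 1 < (pvRow t r).length) && ((pvRow t r).getD c "" == "-")
    && ((pvRow t r).getD (c + 1) "" == "-")

-- pair (r,c) makes A raise IndexError: first cell missing, or first cell '-' and second missing
def pvBad (t : List (List String)) (r c : Nat) : Bool :=
  decide (t.length ≤ r) || decide ((pvRow t r).length ≤ c)
    || (((pvRow t r).getD c "" == "-") && decide ((pvRow t r).length ≤ c + 1))

def Pre_verifica_existencia_micro_traco (tabuleiro_temp : List (List String)) : Prop :=
  ∀ k : Nat, k < 20 → pvBad tabuleiro_temp (k / 4) (k % 4) = true →
    ∃ j : Nat, j < k ∧ pvHit tabuleiro_temp (j / 4) (j % 4) = true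
instance (tabuleiro_temp : List (List String)) : Decidable (Pre_verifica_existencia_micro_traco tabuleiro_temp) := by unfold Pre_verifica_existencia_micro_traco; infer_instance

def pvWitness_verifica_existencia_micro_traco : List (List String) :=
  [["X", "O", "+", "-", "X"],
   ["O", "X", "X", "O", "+"],
   ["+", "-", "X", "O", "X"],
   ["X", "O", "+", "X", "O"],
   ["O", "+", "X", "O", "X"]]

def Spec_verifica_existencia_micro_traco (tabuleiro_temp : List (List String)) (out : Bool) : Prop := out = verifica_existencia_micro_traco_alt tabuleiro_temp
instance (tabuleiro_temp : List (List String)) (out : Bool) : Decidable (Spec_verifica_existencia_micro_traco tabuleiro_temp out) := by unfold Spec_verifica_existencia_micro_traco; infer_instance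

-- ===== CLAIM (what is proved, stated in full; the proofs are below) =====
def Claim_equal_verifica_existencia_micro_traco : Prop := ∀ (tabuleiro_temp : List (List String)), Dom_verifica_existencia_micro_traco tabuleiro_temp → Pre_verifica_existencia_micro_traco tabuleiro_temp → Spec_verifica_existencia_micro_traco tabuleiro_temp (verifica_existencia_micro_traco tabuleiro_temp)

-- ===== LEMMAS AND PROOFS =====
-- cell value row.getD c "" compared with '-', as a Bool
def gdc (row : List String) (c : Nat) : Bool := row.getD c "" == "-"

-- the four adjacent pairs of one row, as A's port sees them
def rowOr (row : List String) : Bool :=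
  (gdc row 0 && gdc row 1) || ((gdc row 1 && gdc row 2) ||
    ((gdc row 2 && gdc row 3) || (gdc row 3 && gdc row 4)))

theorem str_beq_decide (a b : String) : (a == b) = decide (a = b) := by
  by_cases h : a = b <;> simp [h]

theorem inner_pair (tab : List (List String)) (r c c2 : Int) :
    microA_inner tab [(r, c), (r, c2)] 0 =
      (decide (pyCellA tab r c = "-") && decide (pyCellA tab r c2 = "-")) := by
  have hsym : (PySem.List.pyGet? simbolos_disponiveis 3).getD "" = "-" := by decide
  simp [microA_inner, hsym]

theorem gd0 {a : Type} (xs : List a) (d : a) :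
    (PySem.List.pyGet? xs (0 : Int)).getD d = xs.getD 0 d := by
  simpa using congrArg (Option.getD · d) (PySem.List.pyGet?_natCast (xs := xs) (n := 0))

theorem gd1 {a : Type} (xs : List a) (d : a) :
    (PySem.List.pyGet? xs (1 : Int)).getD d = xs.getD 1 d := by
  simpa using congrArg (Option.getD · d) (PySem.List.pyGet?_natCast (xs := xs) (n := 1))

theorem gd2 {a : Type} (xs : List a) (d : a) :
    (PySem.List.pyGet? xs (2 : Int)).getD d = xs.getD 2 d := by
  simpa using congrArg (Option.getD · d) (PySem.List.pyGet?_natCast (xs := xs) (n := 2))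

theorem gd3 {a : Type} (xs : List a) (d : a) :
    (PySem.List.pyGet? xs (3 : Int)).getD d = xs.getD 3 d := by
  simpa using congrArg (Option.getD · d) (PySem.List.pyGet?_natCast (xs := xs) (n := 3))

theorem gd4 {a : Type} (xs : List a) (d : a) :
    (PySem.List.pyGet? xs (4 : Int)).getD d = xs.getD 4 d := by
  simpa using congrArg (Option.getD · d) (PySem.List.pyGet?_natCast (xs := xs) (n := 4))

-- B's per-row body equals the row-wise disjunction rowOr of the (totalized) row
theorem rowB (tab : List (List String)) (i : Int) :
    microB_linha tab i = rowOr ((PySem.List.pyGet? tab i).getD []) := by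
  have hr : PySem.List.pyRange 1 4 1 = [1, 2, 3] := by decide
  simp only [microB_linha, hr]
  generalize (PySem.List.pyGet? tab i).getD [] = fila
  simp only [pyCellB, gd0 fila "", gd4 fila ""]
  simp only [List.getD]
  by_cases ha : fila[0]?.getD "" = "-" <;> by_cases hb : fila[1]?.getD "" = "-" <;>
      by_cases hc : fila[2]?.getD "" = "-" <;> by_cases hd : fila[3]?.getD "" = "-" <;>
      by_cases he : fila[4]?.getD "" = "-" <;>
    simp [microB_cols, pyCellB, gd1 fila "", gd2 fila "", gd3 fila "", rowOr, gdc,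
      List.getD, str_beq_decide, ha, hb, hc, hd, he]

theorem micro_eq (tab : List (List String)) :
    verifica_existencia_micro_traco tab = verifica_existencia_micro_traco_alt tab := by
  have hs : PySem.List.slice posicoes_traco (some 15) none =
      [[(0, 0), (0, 1)], [(0, 1), (0, 2)], [(0, 2), (0, 3)], [(0, 3), (0, 4)],
       [(1, 0), (1, 1)], [(1, 1), (1, 2)], [(1, 2), (1, 3)], [(1, 3), (1, 4)],
       [(2, 0), (2, 1)], [(2, 1), (2, 2)], [(2, 2), (2, 3)], [(2, 3), (2, 4)],
       [(3, 0), (3, 1)], [(3, 1), (3, 2)], [(3, 2), (3, 3)], [(3, 3), (3, 4)],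
       [(4, 0), (4, 1)], [(4, 1), (4, 2)], [(4, 2), (4, 3)], [(4, 3), (4, 4)]] := by decide
  have hr : PySem.List.pyRange 0 5 1 = [0, 1, 2, 3, 4] := by decide
  unfold verifica_existencia_micro_traco verifica_existencia_micro_traco_alt
  rw [hs, hr]
  simp [microA_outer, inner_pair, microB_rows, rowB, pyCellA, gd0, gd1, gd2, gd3, gd4,
    rowOr, gdc, str_beq_decide, Bool.or_assoc]

-- ===== VERDICT (by name: the statement is the Claim_ definition above) =====
theorem verifica_existencia_micro_traco_spec : Claim_equal_verifica_existencia_micro_traco := by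
  intro tab _ _
  exact micro_eq tab
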